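-- pv_equiv track=rewrite | github.com/tombarz/Therapist_AI | preprocessing/utils.py | remove_one_worded_counselor_answer
-- ===== SOURCE A (Python) =====
-- def remove_one_worded_counselor_answer(data: list[tuple[str,str]]) -> list[tuple[str,str]]:
--   ret_list = []
--   client_text = ''
--   for i in range(len(data)):
--     if i == len(data) - 1 or len(data[i][1].split(" ")) > 1:
--       if client_text != '':
--         ret_list.append((client_text + data[i][0],data[i][1]))
--         client_text = ''
--       else:
--         ret_list.append((data[i][0],data[i][1]))
--     else:
--       client_text += data[i][0] + " "
--   return ret_list
-- ===== SOURCE B (Python) =====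
-- def remove_one_worded_counselor_answer(data: list[tuple[str, str]]) -> list[tuple[str, str]]:
--     n = len(data)
--     keepers = [i for i in range(n) if i == n - 1 or len(data[i][1].split(" ")) > 1]
--     out = []
--     start = 0
--     for k in keepers:
--         prefix = "".join(data[j][0] + " " for j in range(start, k))
--         out.append((prefix + data[k][0], data[k][1]))
--         start = k + 1
--     return out
-- ===== Notes on version B (the rewrite author's own statement) =====
-- stated objective: alternative
-- what changed: Replaces the running client_text accumulator with a two-pass decomposition: first collect the boundary indices, then rebuild each output tuple by joining the first-strings of the absorbed slice between consecutive boundaries.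
import Mathlib
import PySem

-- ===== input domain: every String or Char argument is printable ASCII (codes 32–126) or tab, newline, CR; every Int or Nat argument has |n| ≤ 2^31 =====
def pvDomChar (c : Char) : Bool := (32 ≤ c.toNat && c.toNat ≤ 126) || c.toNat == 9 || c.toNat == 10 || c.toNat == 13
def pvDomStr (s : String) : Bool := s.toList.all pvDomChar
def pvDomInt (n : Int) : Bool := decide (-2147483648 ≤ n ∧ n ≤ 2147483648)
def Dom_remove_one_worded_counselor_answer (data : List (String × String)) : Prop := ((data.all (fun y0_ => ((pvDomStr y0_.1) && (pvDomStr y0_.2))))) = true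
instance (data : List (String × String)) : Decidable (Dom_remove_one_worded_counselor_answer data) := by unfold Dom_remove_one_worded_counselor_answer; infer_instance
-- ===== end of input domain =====

-- B rebuilds each merged turn from the slice between consecutive boundary indices (two passes)
-- instead of A's running client_text accumulator; same cost, alternative decomposition.

-- ===== PORT A =====
-- sep " " is nonempty so split? is never none (no ValueError); .getD [] only unwraps the some
-- boundary test 'i == len(data)-1 or len(data[i][1].split(" ")) > 1' (identical text in A and B)
def pvKeep (data : List (String × String)) (i : Nat) : Bool :=
  decide (i = data.length - 1) || decide (((PySem.Str.split? (data.getD i ("", "")).2 " ").getD []).length > 1)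

-- the body of A's for-loop; state = (ret_list, client_text); indices from range(len(data)) are
-- always in bounds, so data[i] is data.getD i ("","")
def pvStepA (data : List (String × String)) (st : List (String × String) × String) (i : Nat) :
    List (String × String) × String :=
  if pvKeep data i then
    if st.2 ≠ "" then (st.1 ++ [(st.2 ++ (data.getD i ("", "")).1, (data.getD i ("", "")).2)], "")
    else (st.1 ++ [((data.getD i ("", "")).1, (data.getD i ("", "")).2)], "")
  else (st.1, st.2 ++ ((data.getD i ("", "")).1 ++ " "))

def remove_one_worded_counselor_answer (data : List (String × String)) : List (String × String) :=
  ((List.range data.length).foldl (pvStepA data) ([], "")).1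

-- ===== PORT B =====
-- '"".join(data[j][0] + " " for j in range(start, k))'
def pvPrefix (data : List (String × String)) (start k : Nat) : String :=
  (List.range' start (k - start)).foldl (fun acc j => acc ++ ((data.getD j ("", "")).1 ++ " ")) ""

-- the body of B's for-loop over keepers; state = (out, start)
def pvStepB (data : List (String × String)) (st : List (String × String) × Nat) (k : Nat) :
    List (String × String) × Nat :=
  (st.1 ++ [(pvPrefix data st.2 k ++ (data.getD k ("", "")).1, (data.getD k ("", "")).2)], k + 1)

def remove_one_worded_counselor_answer_alt (data : List (String × String)) : List (String × String) :=
  (((List.range data.length).filter (pvKeep data)).foldl (pvStepB data) ([], 0)).1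

-- ===== PRECONDITION & SPEC =====
def Spec_remove_one_worded_counselor_answer (data : List (String × String)) (out : List (String × String)) : Prop := out = remove_one_worded_counselor_answer_alt data
instance (data : List (String × String)) (out : List (String × String)) : Decidable (Spec_remove_one_worded_counselor_answer data out) := by unfold Spec_remove_one_worded_counselor_answer; infer_instance

-- ===== CLAIM (what is proved, stated in full; the proofs are below) =====
def Claim_equal_remove_one_worded_counselor_answer : Prop := ∀ (data : List (String × String)), Dom_remove_one_worded_counselor_answer data → Spec_remove_one_worded_counselor_answer data (remove_one_worded_counselor_answer data)

-- ===== LEMMAS AND PROOFS =====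

-- in the keep branch both arms of A's inner if produce the same pair, since "" ++ s = s
theorem pvStepA_keep (data : List (String × String)) (st : List (String × String) × String)
    (i : Nat) (h : pvKeep data i = true) :
    pvStepA data st i
      = (st.1 ++ [(st.2 ++ (data.getD i ("", "")).1, (data.getD i ("", "")).2)], "") := by
  unfold pvStepA
  rw [h]
  by_cases hb : st.2 = ""
  · simp [hb]
  · simp [hb]

theorem pvPrefix_self (data : List (String × String)) (s : Nat) : pvPrefix data s s = "" := by
  simp [pvPrefix]

theorem pvPrefix_snoc (data : List (String × String)) (start s : Nat) (h : start ≤ s) :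
    pvPrefix data start (s + 1)
      = pvPrefix data start s ++ ((data.getD s ("", "")).1 ++ " ") := by
  unfold pvPrefix
  have h1 : s + 1 - start = (s - start) + 1 := by omega
  have h2 : start + (s - start) = s := by omega
  rw [h1, List.range'_1_concat, List.foldl_append, h2]
  rfl

-- loop invariant: A's client_text equals the joined prefix of the absorbed slice data[start:s]
theorem pvMain (data : List (String × String)) :
    ∀ (m s : Nat) (ret : List (String × String)) (buf : String) (start : Nat),
      start ≤ s → buf = pvPrefix data start s →
      ((List.range' s m).foldl (pvStepA data) (ret, buf)).1
        = (((List.range' s m).filter (pvKeep data)).foldl (pvStepB data) (ret, start)).1 := by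
  intro m
  induction m with
  | zero => intro s ret buf start _ _; rfl
  | succ m ih =>
    intro s ret buf start hle hbuf
    rw [List.range'_succ]
    by_cases hk : pvKeep data s = true
    · rw [List.foldl_cons, List.filter_cons_of_pos hk, List.foldl_cons,
        pvStepA_keep data _ _ hk]
      have : pvStepB data (ret, start) s
          = (ret ++ [(pvPrefix data start s ++ (data.getD s ("", "")).1, (data.getD s ("", "")).2)], s + 1) := rfl
      rw [this, ← hbuf]
      exact ih (s + 1) _ "" (s + 1) (le_refl _) (pvPrefix_self data (s + 1)).symm
    · have hk' : pvKeep data s ≠ true := hk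
      rw [List.foldl_cons, List.filter_cons_of_neg (by simpa using hk')]
      have hstep : pvStepA data (ret, buf) s
          = (ret, buf ++ ((data.getD s ("", "")).1 ++ " ")) := by
        unfold pvStepA
        simp [hk]
      rw [hstep]
      exact ih (s + 1) ret _ start (by omega)
        (by rw [hbuf, pvPrefix_snoc data start s hle])

-- ===== VERDICT (by name: the statement is the Claim_ definition above) =====
theorem remove_one_worded_counselor_answer_spec : Claim_equal_remove_one_worded_counselor_answer := by
  intro data _
  unfold Spec_remove_one_worded_counselor_answer
  unfold remove_one_worded_counselor_answer remove_one_worded_counselor_answer_alt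
  rw [List.range_eq_range']
  exact (pvMain data data.length 0 [] "" 0 (le_refl 0) (pvPrefix_self data 0).symm)
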